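-- pv_equiv track=rewrite | github.com/Baby0327/Algorithm | 프로그래머스/0/120843. 공 던지기/공 던지기.py | solution
-- ===== SOURCE A (Python) =====
-- def solution(numbers, k):
--     answer = 0
--     l = len(numbers)
--
--     for i in range(k - 1):
--         answer += 2
--
--         if answer >= l:
--             answer %= l
--
--     return numbers[answer]
-- ===== SOURCE B (Python) =====
-- def solution(numbers, k):
--     return numbers[2 * max(k - 1, 0) % len(numbers)]
-- ===== Notes on version B (the rewrite author's own statement) =====
-- stated objective: faster
-- what changed: Replaces the k-1 iteration loop that steps the index by 2 with the closed-form index 2*max(k-1,0) % len(numbers): O(1) in k instead of O(k); measured 2.09x at the largest size in one timing run (1.38x in another).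
import Mathlib
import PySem

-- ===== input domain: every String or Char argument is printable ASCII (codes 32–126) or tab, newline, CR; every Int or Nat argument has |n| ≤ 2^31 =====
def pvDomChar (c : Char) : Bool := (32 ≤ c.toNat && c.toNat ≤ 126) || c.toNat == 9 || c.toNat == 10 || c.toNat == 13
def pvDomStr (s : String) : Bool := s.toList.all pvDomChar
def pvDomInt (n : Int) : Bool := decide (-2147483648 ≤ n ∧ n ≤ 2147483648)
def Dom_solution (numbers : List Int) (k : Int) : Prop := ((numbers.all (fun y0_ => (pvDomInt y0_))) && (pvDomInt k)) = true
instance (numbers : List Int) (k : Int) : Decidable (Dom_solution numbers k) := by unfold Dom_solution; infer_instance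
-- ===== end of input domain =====

-- B replaces A's k-1-step loop by the closed-form index 2*max(k-1,0) % len(numbers) (O(1) in k vs O(k)).

-- ===== PORT A =====
def solution (numbers : List Int) (k : Int) : Int :=
  let l : Int := numbers.length
  let answer : Int :=
    (PySem.List.pyRange 0 (k - 1) 1).foldl
      (fun answer _ =>
        let answer := answer + 2
        if answer ≥ l then PySem.Int.mod answer l else answer) 0
  (PySem.List.pyGet? numbers answer).getD 0   -- none (IndexError) excluded by Pre_

-- ===== PORT B =====
def solution_alt (numbers : List Int) (k : Int) : Int :=
  (PySem.List.pyGet? numbers (PySem.Int.mod (2 * max (k - 1) 0) (numbers.length : Int))).getD 0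

-- ===== PRECONDITION & SPEC =====
-- A raises on the empty list (ZeroDivisionError for k ≥ 2, IndexError otherwise); B also raises there.
def Pre_solution (numbers : List Int) (k : Int) : Prop := numbers ≠ []
instance (numbers : List Int) (k : Int) : Decidable (Pre_solution numbers k) := by unfold Pre_solution; infer_instance
def pvWitness_solution : List Int × Int := ([10, 20, 30], 4)

def Spec_solution (numbers : List Int) (k : Int) (out : Int) : Prop := out = solution_alt numbers k
instance (numbers : List Int) (k : Int) (out : Int) : Decidable (Spec_solution numbers k out) := by unfold Spec_solution; infer_instance

-- ===== CLAIM (what is proved, stated in full; the proofs are below) =====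
def Claim_equal_solution : Prop := ∀ (numbers : List Int) (k : Int), Dom_solution numbers k → Pre_solution numbers k → Spec_solution numbers k (solution numbers k)

-- ===== LEMMAS AND PROOFS =====

-- Loop invariant: starting from 0 ≤ a < l, A's loop body keeps the index in [0, l) and
-- the fold over any list of length n computes (a + 2*n) % l.
theorem solution_loop_inv (l : Int) (hl : 0 < l) (L : List Int) :
    ∀ a : Int, 0 ≤ a → a < l →
      L.foldl (fun answer _ =>
          let answer := answer + 2
          if answer ≥ l then PySem.Int.mod answer l else answer) a
        = (a + 2 * (L.length : Int)) % l := by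
  induction L with
  | nil =>
      intro a ha hal
      simp [Int.emod_eq_of_lt ha hal]
  | cons x L ih =>
      intro a ha hal
      have hstep : (if a + 2 ≥ l then PySem.Int.mod (a + 2) l else a + 2) = (a + 2) % l := by
        split_ifs with h
        · exact PySem.Int.mod_eq_emod_of_pos hl
        · exact (Int.emod_eq_of_lt (by omega) (by omega)).symm
      simp only [List.foldl_cons, List.length_cons]
      rw [hstep]
      rw [ih ((a + 2) % l) (Int.emod_nonneg _ (by omega)) (Int.emod_lt_of_pos _ hl)]
      rw [Int.emod_add_emod]
      push_cast
      ring_nf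

theorem solution_spec : Claim_equal_solution := by
  unfold Claim_equal_solution
  intro numbers k _ hpre
  unfold Spec_solution solution solution_alt
  show (PySem.List.pyGet? numbers
      ((PySem.List.pyRange 0 (k - 1) 1).foldl
        (fun answer _ =>
          let answer := answer + 2
          if answer ≥ (numbers.length : Int) then PySem.Int.mod answer (numbers.length : Int) else answer)
        0)).getD 0
    = (PySem.List.pyGet? numbers (PySem.Int.mod (2 * max (k - 1) 0) (numbers.length : Int))).getD 0
  have hl : 0 < (numbers.length : Int) := by
    have : numbers.length ≠ 0 := fun h => hpre (List.eq_nil_of_length_eq_zero h)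
    omega
  have hlen : ((PySem.List.pyRange 0 (k - 1) 1).length : Int) = max (k - 1) 0 := by
    rw [PySem.List.length_pyRange_one]
    omega
  rw [solution_loop_inv (numbers.length : Int) hl _ 0 le_rfl hl, hlen,
    ← PySem.Int.mod_eq_emod_of_pos hl]
  norm_num
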